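-- pv_equiv track=rewrite | github.com/ojh6404/imitator | imitator/models/obs_nets.py | calculate_deconv_output_size
-- ===== SOURCE A (Python) =====
-- from typing import (
--     List,
--     Dict,
--     Tuple,
--     Union,
--     Optional,
--     Any,
--     Callable,
--     Iterable,
--     Type,
--     Sequence,
-- )
--
-- def calculate_deconv_output_size(
--     input_size: List[int],
--     kernel_sizes: List[int],
--     strides: List[int],
--     paddings: List[int],
--     output_paddings: List[int],
-- ) -> List[int]:
--     assert len(kernel_sizes) == len(strides) == len(paddings) == len(output_paddings)
--     output_size = list(input_size)
--     for i in range(len(kernel_sizes)):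
--         output_size[0] = (
--             (output_size[0] - 1) * strides[i]
--             - 2 * paddings[i]
--             + kernel_sizes[i]
--             + output_paddings[i]
--         )
--         output_size[1] = (
--             (output_size[1] - 1) * strides[i]
--             - 2 * paddings[i]
--             + kernel_sizes[i]
--             + output_paddings[i]
--         )
--     return output_size
-- ===== SOURCE B (Python) =====
-- def calculate_deconv_output_size(
--     input_size,
--     kernel_sizes,
--     strides,
--     paddings,
--     output_paddings,
-- ):
--     assert len(kernel_sizes) == len(strides) == len(paddings) == len(output_paddings)
--     a, b = 1, 0
--     for k, s, p, op in zip(kernel_sizes, strides, paddings, output_paddings):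
--         a = s * a
--         b = s * b + k - 2 * p + op - s
--     return [a * x + b if i < 2 else x for i, x in enumerate(input_size)]
-- ===== Notes on version B (the rewrite author's own statement) =====
-- stated objective: alternative
-- what changed: B composes the per-layer affine maps into a single (a,b) pair in one pass over the zipped layer parameters and then applies a*x+b once to the first two dimensions via an enumerate comprehension, instead of A's loop that maintains two running sizes updated per layer by indexed lookups.
import Mathlib
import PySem

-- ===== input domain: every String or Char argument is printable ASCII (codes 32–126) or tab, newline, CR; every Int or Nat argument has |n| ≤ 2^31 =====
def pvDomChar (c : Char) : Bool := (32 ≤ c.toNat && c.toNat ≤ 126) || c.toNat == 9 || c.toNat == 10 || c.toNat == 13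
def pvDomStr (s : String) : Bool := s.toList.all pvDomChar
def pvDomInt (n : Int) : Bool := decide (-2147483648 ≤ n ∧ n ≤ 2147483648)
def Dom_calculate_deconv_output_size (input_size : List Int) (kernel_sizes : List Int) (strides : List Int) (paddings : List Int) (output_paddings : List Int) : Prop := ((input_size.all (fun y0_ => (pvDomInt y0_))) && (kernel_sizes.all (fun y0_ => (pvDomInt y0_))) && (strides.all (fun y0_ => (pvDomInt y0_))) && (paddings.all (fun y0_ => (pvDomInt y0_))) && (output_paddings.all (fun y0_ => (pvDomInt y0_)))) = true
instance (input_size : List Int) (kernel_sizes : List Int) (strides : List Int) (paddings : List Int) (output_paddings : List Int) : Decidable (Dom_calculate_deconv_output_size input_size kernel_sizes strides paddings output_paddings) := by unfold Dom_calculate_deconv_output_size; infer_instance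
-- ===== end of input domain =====

-- B composes the per-layer affine maps into one (a,b) pair and applies it once to the first
-- two dimensions (objective: alternative decomposition; same cost, return value only).

-- ===== PORT A =====
def calculate_deconv_output_size (input_size : List Int) (kernel_sizes : List Int) (strides : List Int) (paddings : List Int) (output_paddings : List Int) : List Int :=
  -- assert len(...) == ... : AssertionError excluded by Pre_
  let output_size := input_size
  (PySem.List.pyRange 0 (kernel_sizes.length : Int) 1).foldl
    (fun out i =>
      let out := out.set 0 ((PySem.List.pyGetD out 0 0 - 1) * PySem.List.pyGetD strides i 0
        - 2 * PySem.List.pyGetD paddings i 0 + PySem.List.pyGetD kernel_sizes i 0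
        + PySem.List.pyGetD output_paddings i 0)
      let out := out.set 1 ((PySem.List.pyGetD out 1 0 - 1) * PySem.List.pyGetD strides i 0
        - 2 * PySem.List.pyGetD paddings i 0 + PySem.List.pyGetD kernel_sizes i 0
        + PySem.List.pyGetD output_paddings i 0)
      out) output_size

-- ===== PORT B =====
def calculate_deconv_output_size_alt (input_size : List Int) (kernel_sizes : List Int) (strides : List Int) (paddings : List Int) (output_paddings : List Int) : List Int :=
  -- assert len(...) == ... : AssertionError excluded by Pre_
  let ab := (kernel_sizes.zip (strides.zip (paddings.zip output_paddings))).foldl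
    (fun ab q => (q.2.1 * ab.1, q.2.1 * ab.2 + q.1 - 2 * q.2.2.1 + q.2.2.2 - q.2.1)) ((1 : Int), (0 : Int))
  (PySem.List.enumerate input_size).map (fun p => if p.1 < 2 then ab.1 * p.2 + ab.2 else p.2)

-- ===== PRECONDITION & SPEC =====
-- Pre_ excludes exactly the inputs where A raises: unequal layer-list lengths (AssertionError)
-- and nonempty layers with fewer than two input dimensions (IndexError on output_size[0]/[1]).
def Pre_calculate_deconv_output_size (input_size : List Int) (kernel_sizes : List Int) (strides : List Int) (paddings : List Int) (output_paddings : List Int) : Prop :=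
  kernel_sizes.length = strides.length ∧ kernel_sizes.length = paddings.length ∧
  kernel_sizes.length = output_paddings.length ∧ (kernel_sizes = [] ∨ 2 ≤ input_size.length)
instance (input_size : List Int) (kernel_sizes : List Int) (strides : List Int) (paddings : List Int) (output_paddings : List Int) : Decidable (Pre_calculate_deconv_output_size input_size kernel_sizes strides paddings output_paddings) := by unfold Pre_calculate_deconv_output_size; infer_instance

def pvWitness_calculate_deconv_output_size : List Int × List Int × List Int × List Int × List Int :=
  ([8, 8], [4], [2], [1], [0])

def Spec_calculate_deconv_output_size (input_size : List Int) (kernel_sizes : List Int) (strides : List Int) (paddings : List Int) (output_paddings : List Int) (out : List Int) : Prop := out = calculate_deconv_output_size_alt input_size kernel_sizes strides paddings output_paddings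
instance (input_size : List Int) (kernel_sizes : List Int) (strides : List Int) (paddings : List Int) (output_paddings : List Int) (out : List Int) : Decidable (Spec_calculate_deconv_output_size input_size kernel_sizes strides paddings output_paddings out) := by unfold Spec_calculate_deconv_output_size; infer_instance

-- ===== CLAIM (what is proved, stated in full; the proofs are below) =====
def Claim_equal_calculate_deconv_output_size : Prop := ∀ (input_size : List Int) (kernel_sizes : List Int) (strides : List Int) (paddings : List Int) (output_paddings : List Int), Dom_calculate_deconv_output_size input_size kernel_sizes strides paddings output_paddings → Pre_calculate_deconv_output_size input_size kernel_sizes strides paddings output_paddings → Spec_calculate_deconv_output_size input_size kernel_sizes strides paddings output_paddings (calculate_deconv_output_size input_size kernel_sizes strides paddings output_paddings)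

-- ===== LEMMAS AND PROOFS =====

-- the scalar per-layer map: x ↦ (x-1)*s - 2*p + k + op, with q = (k, (s, (p, op)))
def pvScal (x : Int) (q : Int × Int × Int × Int) : Int :=
  (x - 1) * q.2.1 - 2 * q.2.2.1 + q.1 + q.2.2.2

lemma pv_pg1 (x y : Int) (l : List Int) : PySem.List.pyGetD (x :: y :: l) 1 0 = y := by
  simp [PySem.List.pyGetD, PySem.List.pyGet?, PySem.List.pyIdx?]

lemma pv_foldl_two_cells (zs : List (Int × Int × Int × Int)) :
    ∀ (v0 v1 : Int) (rest : List Int),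
    zs.foldl (fun (out : List Int) q =>
      let out := out.set 0 ((PySem.List.pyGetD out 0 0 - 1) * q.2.1 - 2 * q.2.2.1 + q.1 + q.2.2.2)
      let out := out.set 1 ((PySem.List.pyGetD out 1 0 - 1) * q.2.1 - 2 * q.2.2.1 + q.1 + q.2.2.2)
      out) (v0 :: v1 :: rest)
    = (zs.foldl pvScal v0) :: (zs.foldl pvScal v1) :: rest := by
  induction zs with
  | nil => intro v0 v1 rest; rfl
  | cons q zs ih =>
    intro v0 v1 rest
    simp only [List.foldl_cons, PySem.List.pyGetD_zero_cons, List.set_cons_zero]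
    rw [pv_pg1]
    have hset : ((((v0 - 1) * q.2.1 - 2 * q.2.2.1 + q.1 + q.2.2.2) :: v1 :: rest).set 1
        ((v1 - 1) * q.2.1 - 2 * q.2.2.1 + q.1 + q.2.2.2)) = pvScal v0 q :: pvScal v1 q :: rest := rfl
    rw [hset]
    exact ih _ _ rest

lemma pv_affine (zs : List (Int × Int × Int × Int)) :
    ∀ (a b v : Int),
    (zs.foldl (fun ab q => (q.2.1 * ab.1, q.2.1 * ab.2 + q.1 - 2 * q.2.2.1 + q.2.2.2 - q.2.1)) (a, b)).1 * v
      + (zs.foldl (fun ab q => (q.2.1 * ab.1, q.2.1 * ab.2 + q.1 - 2 * q.2.2.1 + q.2.2.2 - q.2.1)) (a, b)).2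
    = zs.foldl pvScal (a * v + b) := by
  induction zs with
  | nil => intro a b v; simp
  | cons q zs ih =>
    intro a b v
    simp only [List.foldl_cons]
    rw [ih (q.2.1 * a) (q.2.1 * b + q.1 - 2 * q.2.2.1 + q.2.2.2 - q.2.1) v]
    congr 1
    simp [pvScal]; ring

lemma pv_enum_tail (xs : List Int) : ∀ (s A B : Int), 2 ≤ s →
    (PySem.List.enumerate xs s).map (fun p => if p.1 < 2 then A * p.2 + B else p.2) = xs := by
  induction xs with
  | nil => intro s A B _; simp [PySem.List.enumerate_nil]
  | cons x xs ih =>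
    intro s A B hs
    rw [PySem.List.enumerate_cons]
    simp only [List.map_cons]
    rw [if_neg (by omega), ih (s + 1) A B (by omega)]

lemma pv_enum_id (xs : List Int) : ∀ (s : Int),
    (PySem.List.enumerate xs s).map (fun p => if p.1 < 2 then 1 * p.2 + 0 else p.2) = xs := by
  induction xs with
  | nil => intro s; simp [PySem.List.enumerate_nil]
  | cons x xs ih =>
    intro s
    rw [PySem.List.enumerate_cons]
    simp only [List.map_cons]
    rw [ih (s + 1)]
    by_cases h : s < 2 <;> simp [h]

lemma pv_quad_get (kernel_sizes strides paddings output_paddings : List Int)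
    (h1 : kernel_sizes.length = strides.length) (h2 : kernel_sizes.length = paddings.length)
    (h3 : kernel_sizes.length = output_paddings.length) (i : Int) (h0 : 0 ≤ i)
    (hi : i < (kernel_sizes.length : Int)) :
    PySem.List.pyGetD (kernel_sizes.zip (strides.zip (paddings.zip output_paddings))) i ((0 : Int), ((0 : Int), ((0 : Int), (0 : Int))))
    = (PySem.List.pyGetD kernel_sizes i 0, (PySem.List.pyGetD strides i 0, (PySem.List.pyGetD paddings i 0, PySem.List.pyGetD output_paddings i 0))) := by
  have hlen : (kernel_sizes.zip (strides.zip (paddings.zip output_paddings))).length = kernel_sizes.length := by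
    simp [List.length_zip]; omega
  rw [PySem.List.pyGetD_eq_getElem _ _ h0 (by rw [hlen]; exact hi),
      PySem.List.pyGetD_eq_getElem _ _ h0 hi,
      PySem.List.pyGetD_eq_getElem _ _ h0 (by omega : i < (strides.length : Int)),
      PySem.List.pyGetD_eq_getElem _ _ h0 (by omega : i < (paddings.length : Int)),
      PySem.List.pyGetD_eq_getElem _ _ h0 (by omega : i < (output_paddings.length : Int))]
  simp [List.getElem_zip]

-- ===== VERDICT (by name: the statement is the Claim_ definition above) =====
theorem calculate_deconv_output_size_spec : Claim_equal_calculate_deconv_output_size := by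
  intro input_size kernel_sizes strides paddings output_paddings _ hpre
  obtain ⟨h1, h2, h3, hcase⟩ := hpre
  unfold Spec_calculate_deconv_output_size calculate_deconv_output_size calculate_deconv_output_size_alt
  set zs := kernel_sizes.zip (strides.zip (paddings.zip output_paddings)) with hzs
  have hlen : zs.length = kernel_sizes.length := by
    simp [hzs, List.length_zip]; omega
  rcases hcase with hnil | hlong
  · -- no layers: A returns input_size, B applies the identity affine map
    subst hnil
    simp only [List.length_nil, Nat.cast_zero, PySem.List.pyRange_zero]
    have : zs = [] := by simpa using List.eq_nil_of_length_eq_zero (by simp [hlen])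
    rw [this]
    simp only [List.foldl_nil]
    exact (pv_enum_id input_size 0).symm
  · -- at least two dimensions
    obtain ⟨v0, t, rfl⟩ : ∃ v0 t, input_size = v0 :: t := by
      cases input_size with
      | nil => simp at hlong
      | cons a t => exact ⟨a, t, rfl⟩
    obtain ⟨v1, rest, rfl⟩ : ∃ v1 rest, t = v1 :: rest := by
      cases t with
      | nil => simp at hlong
      | cons a r => exact ⟨a, r, rfl⟩
    -- A side: turn indexed fold over range into fold over the zipped layers
    have hA : (PySem.List.pyRange 0 (kernel_sizes.length : Int) 1).foldl
        (fun out i =>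
          let out := out.set 0 ((PySem.List.pyGetD out 0 0 - 1) * PySem.List.pyGetD strides i 0
            - 2 * PySem.List.pyGetD paddings i 0 + PySem.List.pyGetD kernel_sizes i 0
            + PySem.List.pyGetD output_paddings i 0)
          let out := out.set 1 ((PySem.List.pyGetD out 1 0 - 1) * PySem.List.pyGetD strides i 0
            - 2 * PySem.List.pyGetD paddings i 0 + PySem.List.pyGetD kernel_sizes i 0
            + PySem.List.pyGetD output_paddings i 0)
          out) (v0 :: v1 :: rest)
        = zs.foldl (fun (out : List Int) q =>
          let out := out.set 0 ((PySem.List.pyGetD out 0 0 - 1) * q.2.1 - 2 * q.2.2.1 + q.1 + q.2.2.2)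
          let out := out.set 1 ((PySem.List.pyGetD out 1 0 - 1) * q.2.1 - 2 * q.2.2.1 + q.1 + q.2.2.2)
          out) (v0 :: v1 :: rest) := by
      rw [show ((kernel_sizes.length : Int)) = (zs.length : Int) by rw [hlen]]
      rw [← PySem.List.foldl_pyRange_zero_pyGetD' zs ((0 : Int), ((0 : Int), ((0 : Int), (0 : Int))))]
      apply PySem.List.foldl_congr_mem
      intro acc i hi
      rw [PySem.List.mem_pyRange_one] at hi
      have hq := pv_quad_get kernel_sizes strides paddings output_paddings h1 h2 h3 i hi.1
        (by rw [← hlen]; exact hi.2)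
      rw [hq]
    rw [hA, pv_foldl_two_cells]
    -- B side
    rw [PySem.List.enumerate_cons, PySem.List.enumerate_cons]
    simp only [List.map_cons]
    rw [if_pos (by norm_num), if_pos (by norm_num)]
    rw [pv_enum_tail rest (0 + 1 + 1) _ _ (by norm_num)]
    rw [pv_affine zs 1 0 v0, pv_affine zs 1 0 v1]
    norm_num
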